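-- pv_equiv track=rewrite | github.com/hipotures/mdm | scripts/ml/versions/version_6.py | create_cv_spinner_display
-- ===== SOURCE A (Python) =====
-- def create_cv_spinner_display(current_fold: int, total_folds: int) -> str:
--     """Create aesthetic CV progress spinner: ■□□ (for CV=3, showing 1 done, 2 pending)"""
--     spinner = ""
--     for i in range(total_folds):
--         if i < current_fold:
--             spinner += "■"  # Completed
--         elif i == current_fold:
--             spinner += "■"  # Current (also filled to show progress)
--         else:
--             spinner += "□"  # Pending
--     return spinner
-- ===== SOURCE B (Python) =====
-- def create_cv_spinner_display(current_fold: int, total_folds: int) -> str: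
--     """Create aesthetic CV progress spinner: closed-form count, no loop."""
--     filled = max(0, min(current_fold + 1, total_folds))
--     return "■" * filled + "□" * (total_folds - filled)
-- ===== Notes on version B (the rewrite author's own statement) =====
-- stated objective: simpler
-- what changed: Replaces the per-index loop with its three-way branch by a closed-form clamped count filled = max(0, min(current_fold+1, total_folds)) and two string repetitions.
import Mathlib
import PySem

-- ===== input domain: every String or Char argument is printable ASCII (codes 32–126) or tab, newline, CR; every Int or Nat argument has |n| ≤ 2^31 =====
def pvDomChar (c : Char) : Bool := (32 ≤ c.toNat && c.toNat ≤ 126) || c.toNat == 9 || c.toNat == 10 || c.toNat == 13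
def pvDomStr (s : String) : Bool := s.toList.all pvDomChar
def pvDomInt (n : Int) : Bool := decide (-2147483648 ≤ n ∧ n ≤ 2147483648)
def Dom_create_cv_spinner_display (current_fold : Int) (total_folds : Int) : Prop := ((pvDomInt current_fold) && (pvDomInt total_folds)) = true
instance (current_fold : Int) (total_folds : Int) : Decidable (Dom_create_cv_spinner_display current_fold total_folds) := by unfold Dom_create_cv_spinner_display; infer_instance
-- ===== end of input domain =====

-- B replaces A's per-index loop with its three-way branch by a closed-form clamped
-- count of filled cells and two string repetitions (objective: simpler).

-- ===== PORT A =====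
-- literal transliteration of A: a loop over range(total_folds) appending one square per index
def create_cv_spinner_display (current_fold : Int) (total_folds : Int) : String :=
  (PySem.List.pyRange 0 total_folds 1).foldl
    (fun spinner i =>
      if i < current_fold then spinner ++ "■"
      else if i = current_fold then spinner ++ "■"
      else spinner ++ "□") ""

-- ===== PORT B =====
-- literal transliteration of B: filled = max(0, min(current_fold+1, total_folds));
-- "■"*filled + "□"*(total_folds-filled)  ("s"*n ported as ofList (replicate n.toNat c))
def create_cv_spinner_display_alt (current_fold : Int) (total_folds : Int) : String :=
  String.ofList (List.replicate (max 0 (min (current_fold + 1) total_folds)).toNat '■')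
    ++ String.ofList (List.replicate (total_folds - max 0 (min (current_fold + 1) total_folds)).toNat '□')

-- ===== PRECONDITION & SPEC =====
def Spec_create_cv_spinner_display (current_fold : Int) (total_folds : Int) (out : String) : Prop := out = create_cv_spinner_display_alt current_fold total_folds
instance (current_fold : Int) (total_folds : Int) (out : String) : Decidable (Spec_create_cv_spinner_display current_fold total_folds out) := by unfold Spec_create_cv_spinner_display; infer_instance

-- ===== CLAIM (what is proved, stated in full; the proofs are below) =====
def Claim_equal_create_cv_spinner_display : Prop := ∀ (current_fold : Int) (total_folds : Int), Dom_create_cv_spinner_display current_fold total_folds → Spec_create_cv_spinner_display current_fold total_folds (create_cv_spinner_display current_fold total_folds)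

-- ===== LEMMAS AND PROOFS =====

-- A's loop builds exactly one character per index k < n: '■' iff k < current_fold+1
theorem pvLoopA (cf : Int) (n : Nat) :
    (PySem.List.pyRange 0 (n : Int) 1).foldl
      (fun spinner i =>
        if i < cf then spinner ++ "■"
        else if i = cf then spinner ++ "■"
        else spinner ++ "□") ""
    = String.ofList ((List.range n).map (fun (k : Nat) => if (k : Int) < cf + 1 then '■' else '□')) := by
  induction n with
  | zero => simp
  | succ n ih =>
      rw [show ((n + 1 : Nat) : Int) = (n : Int) + 1 by push_cast; ring,
        PySem.List.pyRange_one_succ_right (by positivity), List.foldl_append, ih,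
        List.range_succ, List.map_append]
      by_cases h1 : (n : Int) < cf
      · simp [h1, show (n : Int) ≤ cf by omega]
      · by_cases h2 : (n : Int) = cf
        · simp [h2]
        · simp [h1, h2, show ¬ (n : Int) ≤ cf by omega]

-- mapping a threshold test over range n yields two blocks
theorem pvRangeMapIf {α : Type} (c n : Nat) (x y : α) :
    (List.range n).map (fun k => if k < c then x else y)
      = List.replicate (min c n) x ++ List.replicate (n - min c n) y := by
  induction n with
  | zero => simp
  | succ n ih =>
      rw [List.range_succ, List.map_append, ih]
      by_cases h : n < c
      · simp [h, show min c n = n by omega,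
          List.replicate_succ' (n := n)]
      · have e1 : min c (n + 1) = min c n := by omega
        have e2 : n + 1 - min c n = (n - min c n) + 1 := by omega
        simp [h, e1, e2, List.replicate_succ' (n := n - min c n), List.append_assoc]

theorem create_cv_spinner_display_nonneg (cf : Int) (n : Nat) :
    create_cv_spinner_display cf (n : Int) = create_cv_spinner_display_alt cf (n : Int) := by
  unfold create_cv_spinner_display create_cv_spinner_display_alt
  rw [pvLoopA]
  have hpt : ∀ k ∈ List.range n,
      (if ((k : Int)) < cf + 1 then '■' else '□')
        = (if k < (max 0 (min (cf + 1) (n : Int))).toNat then '■' else '□') := by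
    intro k hk
    have hk' : k < n := List.mem_range.mp hk
    by_cases h : (k : Int) < cf + 1
    · simp [h, show k < (max 0 (min (cf + 1) (n : Int))).toNat by omega]
    · simp [h, show ¬ k < (max 0 (min (cf + 1) (n : Int))).toNat by omega]
  rw [List.map_congr_left hpt, pvRangeMapIf]
  have e1 : min (max 0 (min (cf + 1) (n : Int))).toNat n
      = (max 0 (min (cf + 1) (n : Int))).toNat := by omega
  have e2 : n - (max 0 (min (cf + 1) (n : Int))).toNat
      = ((n : Int) - max 0 (min (cf + 1) (n : Int))).toNat := by omega
  rw [e1, e2]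
  simp

-- ===== VERDICT (by name: the statement is the Claim_ definition above) =====
theorem create_cv_spinner_display_spec : Claim_equal_create_cv_spinner_display := by
  intro cf tf _
  unfold Spec_create_cv_spinner_display
  by_cases h : 0 ≤ tf
  · obtain ⟨n, rfl⟩ := Int.eq_ofNat_of_zero_le h
    exact create_cv_spinner_display_nonneg cf n
  · have hneg : tf < 0 := by omega
    unfold create_cv_spinner_display create_cv_spinner_display_alt
    have hr : PySem.List.pyRange 0 tf 1 = [] := by
      rw [PySem.List.pyRange_one]
      simp
      omega
    rw [hr]
    have f0 : (max 0 (min (cf + 1) tf)).toNat = 0 := by omega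
    have e0 : (tf - max 0 (min (cf + 1) tf)).toNat = 0 := by omega
    rw [f0, e0]
    simp
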